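-- pv_equiv track=rewrite | github.com/Truedick23/DataContentSecurity | 3/fmm&bmm.py | get_segment_left
-- ===== SOURCE A (Python) =====
-- def get_segment_left(text, word_list):
--     if text in word_list:
--         return text
--     elif len(text) == 0:
--         return ""
--     elif len(text) == 1:
--         return text
--     else:
--         length = len(text) - 1
--         text = text[-length:]
--         return get_segment_left(text, word_list)
-- ===== SOURCE B (Python) =====
-- def get_segment_left(text, word_list):
--     # Iterative suffix scan instead of recursion: try each suffix in order of
--     # decreasing length; if none matches, fall back to the last character.
--     for i in range(len(text)):
--         suffix = text[i:]
--         if suffix in word_list: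
--             return suffix
--     return text[len(text) - 1:]
-- ===== Notes on version B (the rewrite author's own statement) =====
-- stated objective: simpler
-- what changed: Replaced the tail recursion that repeatedly re-slices text[-(len-1):] by a single iterative scan over suffix start indices with one fall-back return for the no-match case.
import Mathlib
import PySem

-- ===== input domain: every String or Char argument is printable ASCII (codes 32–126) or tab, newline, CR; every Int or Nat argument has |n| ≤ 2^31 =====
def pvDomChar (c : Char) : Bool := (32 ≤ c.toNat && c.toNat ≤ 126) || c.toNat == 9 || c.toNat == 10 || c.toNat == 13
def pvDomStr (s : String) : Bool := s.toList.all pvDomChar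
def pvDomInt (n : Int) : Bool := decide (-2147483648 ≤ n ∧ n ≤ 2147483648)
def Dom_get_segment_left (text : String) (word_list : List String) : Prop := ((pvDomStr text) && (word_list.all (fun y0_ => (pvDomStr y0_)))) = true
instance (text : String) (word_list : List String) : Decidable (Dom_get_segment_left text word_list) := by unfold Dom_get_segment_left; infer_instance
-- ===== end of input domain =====

-- B replaces A's tail recursion by an iterative scan over suffix start indices; return values are proved identical.

-- ===== PORT A =====
-- termination helper, cited by the port's decreasing_by
theorem pvSliceA_len {cs : List Char} (h2 : 2 ≤ cs.length) :
    (PySem.List.slice cs (some (-((cs.length - 1 : Nat) : Int))) none).length < cs.length := by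
  rw [PySem.List.slice_from_neg_natCast _ _ (by omega)]
  simp
  omega

-- literal transliteration of A's recursion on the character list of `text`
def pvGslA (cs : List Char) (word_list : List String) : String :=
  if String.ofList cs ∈ word_list then String.ofList cs
  else if cs.length = 0 then ""
  else if cs.length = 1 then String.ofList cs
  else
    -- length = len(text) - 1; text = text[-length:]
    pvGslA (PySem.List.slice cs (some (-((cs.length - 1 : Nat) : Int))) none) word_list
termination_by cs.length
decreasing_by exact pvSliceA_len (by omega)

def get_segment_left (text : String) (word_list : List String) : String :=
  pvGslA text.toList word_list

-- ===== PORT B =====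
-- for i in range(len(text)): if text[i:] in word_list: return text[i:]; then the fall-back
def get_segment_left_alt (text : String) (word_list : List String) : String :=
  match (List.range text.toList.length).findSome? (fun i =>
      let suffix := String.ofList (text.toList.drop i)
      if suffix ∈ word_list then some suffix else none) with
  | some s => s
  | none => String.ofList (text.toList.drop (text.toList.length - 1))

-- ===== PRECONDITION & SPEC =====
def Spec_get_segment_left (text : String) (word_list : List String) (out : String) : Prop := out = get_segment_left_alt text word_list
instance (text : String) (word_list : List String) (out : String) : Decidable (Spec_get_segment_left text word_list out) := by unfold Spec_get_segment_left; infer_instance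

-- ===== CLAIM (what is proved, stated in full; the proofs are below) =====
def Claim_equal_get_segment_left : Prop := ∀ (text : String) (word_list : List String), Dom_get_segment_left text word_list → Spec_get_segment_left text word_list (get_segment_left text word_list)

-- ===== LEMMAS AND PROOFS =====

-- the loop body of B, on a character list
def pvAltBody (cs : List Char) (word_list : List String) : String :=
  match (List.range cs.length).findSome? (fun i =>
      let suffix := String.ofList (cs.drop i)
      if suffix ∈ word_list then some suffix else none) with
  | some s => s
  | none => String.ofList (cs.drop (cs.length - 1))

theorem pvAltBody_mem {cs : List Char} {wl : List String}
    (h : String.ofList cs ∈ wl) : pvAltBody cs wl = String.ofList cs := by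
  match cs with
  | [] => simp [pvAltBody]
  | c :: cs =>
    simp only [pvAltBody, List.length_cons, List.range_succ_eq_map,
      List.findSome?_cons, List.drop_zero]
    rw [if_pos h]

theorem pvAltBody_cons {c : Char} {cs : List Char} {wl : List String}
    (hne : cs ≠ []) (hmem : String.ofList (c :: cs) ∉ wl) :
    pvAltBody (c :: cs) wl = pvAltBody cs wl := by
  have hdrop : (c :: cs).drop ((c :: cs).length - 1) = cs.drop (cs.length - 1) := by
    match cs, hne with
    | c' :: rest, _ => simp
  simp only [pvAltBody, List.length_cons, List.range_succ_eq_map,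
    List.findSome?_cons, List.findSome?_map, List.drop_zero, Function.comp_def,
    List.drop_succ_cons, Nat.add_sub_cancel]
  rw [if_neg hmem]
  simp only [List.length_cons, Nat.add_sub_cancel] at hdrop
  rw [hdrop]

theorem pvGslA_eq_altBody_aux (wl : List String) (n : Nat) :
    ∀ cs : List Char, cs.length ≤ n → pvGslA cs wl = pvAltBody cs wl := by
  induction n with
  | zero =>
    intro cs h
    match cs, h with
    | [], _ => simp [pvGslA, pvAltBody]
  | succ n ih =>
    intro cs hle
    by_cases hmem : String.ofList cs ∈ wl
    · rw [pvAltBody_mem hmem, pvGslA, if_pos hmem]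
    · match cs with
      | [] => simp [pvGslA, pvAltBody]
      | [c] => simp [pvGslA, pvAltBody, hmem]
      | c :: c' :: rest =>
        rw [pvGslA, if_neg hmem, if_neg (by simp), if_neg (by simp)]
        have hs : PySem.List.slice (c :: c' :: rest)
            (some (-(((c :: c' :: rest).length - 1 : Nat) : Int))) none = c' :: rest := by
          rw [PySem.List.slice_from_neg_natCast _ _ (by simp)]
          simp
        rw [hs, ih (c' :: rest) (by simp at hle ⊢; omega),
          pvAltBody_cons (by simp) hmem]

theorem pvGslA_eq_altBody (wl : List String) (cs : List Char) :
    pvGslA cs wl = pvAltBody cs wl :=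
  pvGslA_eq_altBody_aux wl cs.length cs le_rfl

theorem get_segment_left_spec : Claim_equal_get_segment_left := by
  intro text wl _
  unfold Spec_get_segment_left get_segment_left get_segment_left_alt
  rw [pvGslA_eq_altBody]
  rfl
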